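-- pv_equiv track=rewrite | github.com/ghmoon90/windev | pyQRmodify.py | is_alignment_pattern
-- ===== SOURCE A (Python) =====
-- def get_alignment_positions(version):
--     """Retrieve alignment pattern positions for a given QR code version."""
--     if version == 1:
--         return []
--
--     # Number of alignment patterns based on QR code version
--     num_align = (version // 7) + 2
--
--     # Calculate the spacing between alignment patterns
--     size = version * 4 + 17  # Total size of the QR code matrix
--     step = (size - 13) // (num_align - 1)  # Evenly distribute alignment patterns
--
--     # Ensure the step size is even for consistent spacing
--     step = step if step % 2 == 0 else step + 1
--
--     # Calculate positions of alignment patterns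
--     positions = []
--     for i in range(num_align):
--         positions.append(6 + i * step)
--
--     return positions
--
-- def is_alignment_pattern(x, y, version, border, adjusted_matrix_size):
--     """Check if the (x, y) position corresponds to an alignment pattern."""
--     positions = get_alignment_positions(version)
--     for px in positions:
--         for py in positions:
--             # Skip the finder pattern areas
--             if (px == 6 and py == 6) or \
--                (px == 6 and py == adjusted_matrix_size - 1 - 6) or \
--                (px == adjusted_matrix_size - 1 - 6 and py == 6):
--                 continue
--             # Check if (x, y) is within the 5x5 area of the alignment pattern
--             if px - 2 <= x <= px + 2 and py - 2 <= y <= py + 2: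
--                 return True
--     return False
-- ===== SOURCE B (Python) =====
-- def get_alignment_positions(version):
--     """Retrieve alignment pattern positions for a given QR code version."""
--     if version == 1:
--         return []
--     num_align = (version // 7) + 2
--     size = version * 4 + 17
--     step = (size - 13) // (num_align - 1)
--     step = step if step % 2 == 0 else step + 1
--     positions = []
--     for i in range(num_align):
--         positions.append(6 + i * step)
--     return positions
--
-- def is_alignment_pattern(x, y, version, border, adjusted_matrix_size):
--     """Check if the (x, y) position corresponds to an alignment pattern."""
--     positions = get_alignment_positions(version)
--     matching_x = [px for px in positions if px - 2 <= x <= px + 2]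
--     matching_y = [py for py in positions if py - 2 <= y <= py + 2]
--     m = adjusted_matrix_size - 1 - 6
--     corners = {(6, 6), (6, m), (m, 6)}
--     return any((px, py) not in corners for px in matching_x for py in matching_y)
-- ===== Notes on version B (the rewrite author's own statement) =====
-- stated objective: faster
-- what changed: Replaces A's nested scan over all position pairs (with an inline corner-skip and early return) by two independent one-pass candidate filters on the x- and y-coordinates followed by a check that some candidate pair is not one of the three finder corners.
import Mathlib
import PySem

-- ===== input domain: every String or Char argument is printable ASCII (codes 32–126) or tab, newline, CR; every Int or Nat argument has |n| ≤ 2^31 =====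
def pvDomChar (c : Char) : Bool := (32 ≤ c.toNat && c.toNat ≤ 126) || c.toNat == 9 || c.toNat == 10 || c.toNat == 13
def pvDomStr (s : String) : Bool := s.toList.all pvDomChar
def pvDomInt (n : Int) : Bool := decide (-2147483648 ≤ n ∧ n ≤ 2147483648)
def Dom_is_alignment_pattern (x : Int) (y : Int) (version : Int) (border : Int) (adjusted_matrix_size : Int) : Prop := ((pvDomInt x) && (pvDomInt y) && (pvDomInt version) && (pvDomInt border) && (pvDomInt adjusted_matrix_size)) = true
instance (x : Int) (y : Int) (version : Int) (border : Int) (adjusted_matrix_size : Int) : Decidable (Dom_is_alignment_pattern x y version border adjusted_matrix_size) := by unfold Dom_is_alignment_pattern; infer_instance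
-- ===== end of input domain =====

-- B replaces A's nested pair scan (with inline corner skip and early return) by two
-- independent per-axis candidate filters plus a final non-corner pair check (objective: faster; return-value equivalence; Pre_ excludes version in [-7,-1] where both Pythons raise ZeroDivisionError).


-- ===== PORT A =====
-- shared helper (B's Python reuses the very same function)
def get_alignment_positions (version : Int) : List Int :=
  if version == 1 then []
  else
    let num_align := PySem.Int.floordiv version 7 + 2
    let size := version * 4 + 17
    let step := PySem.Int.floordiv (size - 13) (num_align - 1)
    let step := if PySem.Int.mod step 2 == 0 then step else step + 1
    (PySem.List.pyRange 0 num_align 1).foldl (fun acc i => acc ++ [6 + i * step]) []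

def is_alignment_pattern (x : Int) (y : Int) (version : Int) (border : Int) (adjusted_matrix_size : Int) : Bool :=
  let positions := get_alignment_positions version
  positions.any (fun px => positions.any (fun py =>
    if (px == 6 && py == 6) || (px == 6 && py == adjusted_matrix_size - 1 - 6) ||
       (px == adjusted_matrix_size - 1 - 6 && py == 6) then
      false
    else
      decide (px - 2 ≤ x ∧ x ≤ px + 2) && decide (py - 2 ≤ y ∧ y ≤ py + 2)))

-- ===== PORT B =====
def is_alignment_pattern_alt (x : Int) (y : Int) (version : Int) (border : Int) (adjusted_matrix_size : Int) : Bool :=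
  let positions := get_alignment_positions version
  let matching_x := positions.filter (fun px => decide (px - 2 ≤ x ∧ x ≤ px + 2))
  let matching_y := positions.filter (fun py => decide (py - 2 ≤ y ∧ y ≤ py + 2))
  let m := adjusted_matrix_size - 1 - 6
  let corners : PySem.Set (Int × Int) := PySem.Set.ofList [(6, 6), (6, m), (m, 6)]
  matching_x.any (fun px => matching_y.any (fun py => !(PySem.Set.contains corners (px, py))))

-- ===== PRECONDITION & SPEC =====
-- Pre_ excludes exactly version ∈ [-7,-1], where version//7 + 2 - 1 = 0 and the Python A
-- (and B, which calls the same helper) raises ZeroDivisionError.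
def Pre_is_alignment_pattern (x : Int) (y : Int) (version : Int) (border : Int) (adjusted_matrix_size : Int) : Prop :=
  ¬ (-7 ≤ version ∧ version ≤ -1)
instance (x : Int) (y : Int) (version : Int) (border : Int) (adjusted_matrix_size : Int) : Decidable (Pre_is_alignment_pattern x y version border adjusted_matrix_size) := by unfold Pre_is_alignment_pattern; infer_instance
def pvWitness_is_alignment_pattern : Int × Int × Int × Int × Int := (7, 21, 7, 0, 45)

def Spec_is_alignment_pattern (x : Int) (y : Int) (version : Int) (border : Int) (adjusted_matrix_size : Int) (out : Bool) : Prop := out = is_alignment_pattern_alt x y version border adjusted_matrix_size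
instance (x : Int) (y : Int) (version : Int) (border : Int) (adjusted_matrix_size : Int) (out : Bool) : Decidable (Spec_is_alignment_pattern x y version border adjusted_matrix_size out) := by unfold Spec_is_alignment_pattern; infer_instance

-- ===== CLAIM (what is proved, stated in full; the proofs are below) =====
def Claim_equal_is_alignment_pattern : Prop := ∀ (x : Int) (y : Int) (version : Int) (border : Int) (adjusted_matrix_size : Int), Dom_is_alignment_pattern x y version border adjusted_matrix_size → Pre_is_alignment_pattern x y version border adjusted_matrix_size → Spec_is_alignment_pattern x y version border adjusted_matrix_size (is_alignment_pattern x y version border adjusted_matrix_size)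

-- ===== LEMMAS AND PROOFS =====
theorem ite_not_and (c : Prop) [inst : Decidable c] (b : Bool) :
    (if c then false else b) = (!(decide c) && b) := by
  by_cases h : c <;> simp [h]

theorem contains_corners_eq (m : Int) (px py : Int) :
    PySem.Set.contains (PySem.Set.ofList [(6, 6), (6, m), (m, 6)]) (px, py) = false ↔
    ¬ ((px = 6 ∧ py = 6) ∨ (px = 6 ∧ py = m) ∨ (px = m ∧ py = 6)) := by
  rw [← Bool.not_eq_true, PySem.Set.contains_iff, PySem.Set.mem_ofList]
  simp [Prod.ext_iff]

-- Core lemma: for ANY positions list, the nested corner-skipping scan equals the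
-- filter-then-non-corner-pair formulation.
theorem pair_scan_eq_filter_scan (x y m : Int) (positions : List Int) :
    (positions.any (fun px => positions.any (fun py =>
      if (px == 6 && py == 6) || (px == 6 && py == m) || (px == m && py == 6) then false
      else decide (px - 2 ≤ x ∧ x ≤ px + 2) && decide (py - 2 ≤ y ∧ y ≤ py + 2))))
    =
    ((positions.filter (fun px => decide (px - 2 ≤ x ∧ x ≤ px + 2))).any (fun px =>
      (positions.filter (fun py => decide (py - 2 ≤ y ∧ y ≤ py + 2))).any (fun py =>
        !(PySem.Set.contains (PySem.Set.ofList [(6, 6), (6, m), (m, 6)]) (px, py))))) := by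
  rw [Bool.eq_iff_iff]
  simp only [ite_not_and, List.any_eq_true, List.mem_filter, Bool.and_eq_true,
    Bool.not_eq_true', decide_eq_false_iff_not, decide_eq_true_eq, contains_corners_eq,
    Bool.or_eq_true, beq_iff_eq]
  constructor
  · rintro ⟨px, hpx, py, hpy, hc, hx, hy⟩
    exact ⟨px, ⟨hpx, hx⟩, py, ⟨hpy, hy⟩, fun h => hc (by tauto)⟩
  · rintro ⟨px, ⟨hpx, hx⟩, py, ⟨hpy, hy⟩, hc⟩
    exact ⟨px, hpx, py, hpy, fun h => hc (by tauto), hx, hy⟩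

-- ===== VERDICT (by name: the statement is the Claim_ definition above) =====
theorem is_alignment_pattern_spec : Claim_equal_is_alignment_pattern := by
  intro x y version border ams _ _
  unfold Spec_is_alignment_pattern is_alignment_pattern is_alignment_pattern_alt
  exact pair_scan_eq_filter_scan x y (ams - 1 - 6) (get_alignment_positions version)
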